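-- pv_equiv track=rewrite | github.com/Aasthaengg/IBMdataset | Python_codes/p03053/s371308796.py | solve
-- ===== SOURCE A (Python) =====
-- from collections import deque
--
-- def solve(H, W, A):
--     WALL = - 10 ** 7
--     dist = [[WALL] + [-1] * W + [WALL] for _ in range(H + 2)]
--     dist[0] = dist[-1] = [WALL] * (W + 2)
--
--     queue = deque()
--     for h in range(H):
--         for w in range(W):
--             if A[h][w] == "#":
--                 dist[h + 1][w + 1] = 0
--                 queue.append((h + 1, w + 1))
--
--     while queue:
--         h, w = queue.popleft()
--         d = dist[h][w]
--         for i, j in ((1, 0), (-1, 0), (0, 1), (0, -1)):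
--             y, x = h + i, w + j
--             if dist[y][x] == -1:
--                 dist[y][x] = d + 1
--                 queue.append((y, x))
--
--     res = max(map(max, dist))
--     return res
-- ===== SOURCE B (Python) =====
-- def solve(H, W, A):
--     # Closed form instead of BFS: with no obstacles the BFS distance from the nearest '#'
--     # equals the Manhattan distance to the nearest source.  The original keeps a WALL
--     # border (value -10**7) inside its max, so the running max starts there; a cell with
--     # no source at all keeps the original's "unvisited" value -1.
--     sources = [(h, w) for h in range(H) for w in range(W) if A[h][w] == "#"]
--     best = -10 ** 7
--     for h in range(H):
--         for w in range(W):
--             d = min((abs(h - sh) + abs(w - sw) for sh, sw in sources), default=-1)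
--             if d > best:
--                 best = d
--     return best
-- ===== Notes on version B (the rewrite author's own statement) =====
-- stated objective: alternative
-- what changed: Replaces the multi-source BFS over a mutable bordered dist matrix with a deque by a direct closed form: collect the '#' cells once, then one running max over cells of the min Manhattan distance to a source, with no auxiliary grid, queue or flood fill.
import Mathlib
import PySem

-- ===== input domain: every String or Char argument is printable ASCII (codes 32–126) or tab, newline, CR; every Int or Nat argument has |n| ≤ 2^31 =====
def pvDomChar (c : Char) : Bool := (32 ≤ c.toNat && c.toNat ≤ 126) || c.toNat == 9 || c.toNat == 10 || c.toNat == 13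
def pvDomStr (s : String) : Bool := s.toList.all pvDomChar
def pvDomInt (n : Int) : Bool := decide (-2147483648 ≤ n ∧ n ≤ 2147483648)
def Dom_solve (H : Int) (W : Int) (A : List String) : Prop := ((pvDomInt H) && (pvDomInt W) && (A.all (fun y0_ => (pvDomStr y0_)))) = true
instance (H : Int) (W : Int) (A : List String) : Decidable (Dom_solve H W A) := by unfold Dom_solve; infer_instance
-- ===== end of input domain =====

-- B replaces A's multi-source BFS over a sentinel-bordered mutable grid by a direct closed
-- form: one running max over cells of the min Manhattan distance to a '#' (the max starts at
-- the border value -10^7 that A's padded grid always contributes); proved equal on Pre_solve.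

-- ===== PORT A =====
def wallConst : Int := -(10 ^ 7)

-- dist[y][x]; indices are in range on every executed path under Pre_solve (getD is a totality guard)
def mget (g : List (List Int)) (y x : Int) : Int :=
  PySem.List.pyGetD (PySem.List.pyGetD g y []) x 0

-- dist[y][x] = v
def mset (g : List (List Int)) (y x : Int) (v : Int) : List (List Int) :=
  PySem.List.pySetD g y (PySem.List.pySetD (PySem.List.pyGetD g y []) x v)

-- A[h][w] == "#"  (exact under Pre_solve, where both indexings are in range)
def charA (A : List String) (h w : Int) : Bool :=
  ((PySem.List.pyGet? A h).bind (fun s => PySem.Str.pyGet? s w)) == some '#'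

-- dist = [[WALL] + [-1] * W + [WALL] for _ in range(H + 2)]; dist[0] = dist[-1] = [WALL] * (W + 2)
def initGrid (H W : Int) : List (List Int) :=
  PySem.List.pySetD (PySem.List.pySetD
      ((PySem.List.pyRange 0 (H + 2) 1).map
        (fun _ => [wallConst] ++ List.replicate W.toNat (-1) ++ [wallConst]))
      0 (List.replicate (W + 2).toNat wallConst))
    (-1) (List.replicate (W + 2).toNat wallConst)

-- the source-collecting double loop (state = (dist, queue))
def initState (H W : Int) (A : List String) : List (List Int) × List (Int × Int) :=
  (PySem.List.pyRange 0 H 1).foldl (fun st h =>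
      (PySem.List.pyRange 0 W 1).foldl (fun st w =>
        if charA A h w then (mset st.1 (h + 1) (w + 1) 0, st.2 ++ [(h + 1, w + 1)]) else st) st)
    (initGrid H W, [])

-- one neighbour update of the BFS body
def bfsStep (d h w : Int) (st : List (List Int) × List (Int × Int)) (ij : Int × Int) :
    List (List Int) × List (Int × Int) :=
  let y := h + ij.1
  let x := w + ij.2
  if mget st.1 y x = -1 then (mset st.1 y x (d + 1), st.2 ++ [(y, x)]) else st

-- while queue: ...  (fuel only makes the loop total; it is provably never exhausted)
def bfsLoop : Nat → List (List Int) × List (Int × Int) → List (List Int)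
  | 0, st => st.1
  | _ + 1, (g, []) => g
  | fuel + 1, (g, (h, w) :: rest) =>
      let d := mget g h w
      bfsLoop fuel ([((1:Int),(0:Int)),(-1,0),(0,1),(0,-1)].foldl (bfsStep d h w) (g, rest))

-- max(xs) for a nonempty list (getD is a totality guard; rows are nonempty under Pre_solve)
def rowMax (r : List Int) : Int := (PySem.List.max? r (fun v => v)).getD 0

def solve (H : Int) (W : Int) (A : List String) : Int :=
  let gF := bfsLoop (6 * ((H + 2).toNat * (W + 2).toNat) + 1) (initState H W A)
  rowMax (gF.map rowMax)

-- ===== PORT B =====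
-- A[h][w] == "#"
def charB (A : List String) (h w : Int) : Bool :=
  ((PySem.List.pyGet? A h).bind (fun s => PySem.Str.pyGet? s w)) == some '#'

-- sources = [(h, w) for h in range(H) for w in range(W) if A[h][w] == "#"]
def srcB (H W : Int) (A : List String) : List (Int × Int) :=
  (PySem.List.pyRange 0 H 1).foldl (fun acc h =>
      (PySem.List.pyRange 0 W 1).foldl (fun acc w =>
        if charB A h w then acc ++ [(h, w)] else acc) acc) []

def solve_alt (H : Int) (W : Int) (A : List String) : Int :=
  let sources := srcB H W A
  (PySem.List.pyRange 0 H 1).foldl (fun best h =>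
      (PySem.List.pyRange 0 W 1).foldl (fun best w =>
        -- min(generator, default=-1)
        let d := if sources = [] then (-1 : Int) else
          (PySem.List.min? (sources.map (fun (s : Int × Int) => |h - s.1| + |w - s.2|))
            (fun v => v)).getD 0
        if best < d then d else best) best) (-(10 ^ 7))

-- ===== PRECONDITION & SPEC =====
-- Pre_solve is exactly the domain on which A returns normally: it excludes only inputs on
-- which A raises (H ≤ -2 or W ≤ -2 hit max()/indexing of an empty list, and for a real grid
-- H ≥ 1, W ≥ 1 a missing row or a row shorter than W raises IndexError).
def Pre_solve (H : Int) (W : Int) (A : List String) : Prop :=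
  -1 ≤ H ∧ -1 ≤ W ∧ (1 ≤ H → 1 ≤ W →
    (H ≤ (A.length : Int) ∧ ∀ s ∈ A.take H.toNat, W ≤ (s.length : Int)))
instance (H : Int) (W : Int) (A : List String) : Decidable (Pre_solve H W A) := by
  unfold Pre_solve; infer_instance
def pvWitness_solve : Int × Int × List String := (2, 2, ["#.", ".."])

def Spec_solve (H : Int) (W : Int) (A : List String) (out : Int) : Prop :=
  out = solve_alt H W A
instance (H : Int) (W : Int) (A : List String) (out : Int) : Decidable (Spec_solve H W A out) := by
  unfold Spec_solve; infer_instance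

-- ===== CLAIM (what is proved, stated in full; the proofs are below) =====
def Claim_equal_solve : Prop := ∀ (H : Int) (W : Int) (A : List String),
  Dom_solve H W A → Pre_solve H W A → Spec_solve H W A (solve H W A)

-- ===== LEMMAS AND PROOFS =====

-- proof-side vocabulary
abbrev Lab (g : List (List Int)) (c : Int × Int) : Prop := mget g c.1 c.2 ≠ -1
abbrev inBox (H W : Int) (c : Int × Int) : Prop := 0 ≤ c.1 ∧ c.1 ≤ H + 1 ∧ 0 ≤ c.2 ∧ c.2 ≤ W + 1
abbrev interC (H W : Int) (c : Int × Int) : Prop := 1 ≤ c.1 ∧ c.1 ≤ H ∧ 1 ≤ c.2 ∧ c.2 ≤ W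
def ShapeG (H W : Int) (g : List (List Int)) : Prop :=
  g.length = (H + 2).toNat ∧ ∀ r ∈ g, r.length = (W + 2).toNat
def md (a b : Int × Int) : Int := |a.1 - b.1| + |a.2 - b.2|
def fI (S : List (Int × Int)) (c : Int × Int) : Int :=
  match S with
  | [] => 0
  | s :: r => r.foldl (fun m s' => min m (md c s')) (md c s)
def cnt (g : List (List Int)) : Nat := (g.map (fun r => r.count (-1))).sum
def srcCells (H W : Int) (A : List String) : List (Int × Int) :=
  (PySem.List.pyRange 0 H 1).flatMap
    (fun h => ((PySem.List.pyRange 0 W 1).filter (fun w => charA A h w)).map (fun w => (h, w)))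
def shiftC (c : Int × Int) : Int × Int := (c.1 + 1, c.2 + 1)
def cellsHW (H W : Int) : List (Int × Int) :=
  (PySem.List.pyRange 0 H 1).flatMap (fun h => (PySem.List.pyRange 0 W 1).map (fun w => (h, w)))

-- global loop invariant of A's BFS
structure BInv (H W : Int) (S : List (Int × Int)) (g : List (List Int)) (q : List (Int × Int)) : Prop where
  shape : ShapeG H W g
  border : ∀ c, inBox H W c → ¬ interC H W c → mget g c.1 c.2 = wallConst
  vals : ∀ c, interC H W c → mget g c.1 c.2 = -1 ∨ mget g c.1 c.2 = fI S c
  src : ∀ s ∈ S, Lab g s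
  qint : ∀ c ∈ q, interC H W c ∧ Lab g c
  qsort : q.Pairwise (fun a b => fI S a ≤ fI S b ∧ fI S b ≤ fI S a + 1)
  frontier : ∀ p t, q = p :: t → ∀ c, interC H W c → fI S c ≤ fI S p → Lab g c
  done : ∀ c, interC H W c → Lab g c → c ∉ q →
    ∀ n, md c n = 1 → interC H W n → Lab g n

-- invariant during the four-neighbour fold after popping p (dn = processed directions)
structure MBInv (H W : Int) (S : List (Int × Int)) (p : Int × Int) (dn : List (Int × Int))
    (st : List (List Int) × List (Int × Int)) : Prop where
  shape : ShapeG H W st.1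
  border : ∀ c, inBox H W c → ¬ interC H W c → mget st.1 c.1 c.2 = wallConst
  vals : ∀ c, interC H W c → mget st.1 c.1 c.2 = -1 ∨ mget st.1 c.1 c.2 = fI S c
  src : ∀ s ∈ S, Lab st.1 s
  qint : ∀ c ∈ st.2, interC H W c ∧ Lab st.1 c
  qd : ∀ c ∈ st.2, fI S p ≤ fI S c ∧ fI S c ≤ fI S p + 1
  qsort : st.2.Pairwise (fun a b => fI S a ≤ fI S b ∧ fI S b ≤ fI S a + 1)
  covered : ∀ c, interC H W c → fI S c ≤ fI S p → Lab st.1 c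
  done5 : ∀ c, interC H W c → Lab st.1 c → c ∉ st.2 → c ≠ p →
    ∀ n, md c n = 1 → interC H W n → Lab st.1 n
  procd : ∀ ij ∈ dn, interC H W (p.1 + ij.1, p.2 + ij.2) → Lab st.1 (p.1 + ij.1, p.2 + ij.2)

-- ---- small generic list lemmas ----
theorem foldl_flatMap' {α β γ : Type} (l : List α) (g : α → List β) (f : γ → β → γ) (i : γ) :
    (l.flatMap g).foldl f i = l.foldl (fun a x => (g x).foldl f a) i := by
  induction l generalizing i with
  | nil => rfl
  | cons x t ih => simp [List.flatMap_cons, List.foldl_append, ih]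

theorem filter_flatMap' {α β : Type} (l : List α) (g : α → List β) (p : β → Bool) :
    (l.flatMap g).filter p = l.flatMap (fun x => (g x).filter p) := by
  induction l with
  | nil => rfl
  | cons x t ih => simp [List.flatMap_cons, List.filter_append, ih]

theorem length_flatMap_le {α β : Type} (l : List α) (g : α → List β) (k : Nat)
    (h : ∀ x ∈ l, (g x).length ≤ k) : (l.flatMap g).length ≤ l.length * k := by
  induction l with
  | nil => simp
  | cons x t ih =>
      simp only [List.flatMap_cons, List.length_append, List.length_cons]
      have h1 := h x (by simp)
      have h2 := ih (fun y hy => h y (by simp [hy]))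
      calc (g x).length + (t.flatMap g).length ≤ k + t.length * k := by omega
        _ = (t.length + 1) * k := by ring

theorem sum_map_count_le {α : Type} [BEq α] (l : List (List α)) (a : α) (k : Nat)
    (h : ∀ r ∈ l, r.length ≤ k) : (l.map (fun r => r.count a)).sum ≤ l.length * k := by
  induction l with
  | nil => simp
  | cons r t ih =>
      simp only [List.map_cons, List.sum_cons, List.length_cons]
      have h1 : r.count a ≤ k := le_trans (List.count_le_length) (h r (by simp))
      have h2 := ih (fun y hy => h y (by simp [hy]))
      calc r.count a + (t.map (fun r => r.count a)).sum ≤ k + t.length * k := by omega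
        _ = (t.length + 1) * k := by ring

theorem foldl_id {α β : Type} (l : List α) (i : β) : l.foldl (fun s _ => s) i = i := by
  induction l generalizing i <;> simp [List.foldl, *]

-- ---- rowMax facts ----
theorem rowMax_ge (r : List Int) (v : Int) (h : v ∈ r) : v ≤ rowMax r := by
  cases hr : PySem.List.max? r (fun v => v) with
  | none =>
      rw [PySem.List.max?_eq_none_iff] at hr
      subst hr; cases h
  | some m =>
      have := PySem.List.max?_isMax hr v h
      simp [rowMax, hr]
      exact this
theorem rowMax_mem (r : List Int) (h : r ≠ []) : rowMax r ∈ r := by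
  cases hr : PySem.List.max? r (fun v => v) with
  | none =>
      rw [PySem.List.max?_eq_none_iff] at hr
      exact absurd hr h
  | some m => simpa [rowMax, hr] using PySem.List.max?_mem hr
theorem rowMax_const (r : List Int) (a : Int) (h : r ≠ []) (ha : ∀ v ∈ r, v = a) :
    rowMax r = a := ha _ (rowMax_mem r h)

-- ---- geometry ----
theorem md_nonneg (a b : Int × Int) : 0 ≤ md a b := by
  have := abs_nonneg (a.1 - b.1); have := abs_nonneg (a.2 - b.2); unfold md; omega
theorem md_self (a : Int × Int) : md a a = 0 := by simp [md]
theorem md_symm (a b : Int × Int) : md a b = md b a := by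
  unfold md; rw [abs_sub_comm, abs_sub_comm a.2]
theorem md_zero_eq (a b : Int × Int) (h : md a b = 0) : a = b := by
  unfold md at h
  have h1 := abs_nonneg (a.1 - b.1); have h2 := abs_nonneg (a.2 - b.2)
  have e1 : |a.1 - b.1| = 0 := by omega
  have e2 : |a.2 - b.2| = 0 := by omega
  have := abs_eq_zero.mp e1; have := abs_eq_zero.mp e2
  have : a.1 = b.1 := by omega
  have : a.2 = b.2 := by omega
  exact Prod.ext (by omega) (by omega)
theorem md_triangle (a b c : Int × Int) : md a c ≤ md a b + md b c := by
  unfold md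
  have h1 := abs_sub_le a.1 b.1 c.1
  have h2 := abs_sub_le a.2 b.2 c.2
  omega
theorem md_one_cases (a b : Int × Int) (h : md a b = 1) :
    b = (a.1 + 1, a.2) ∨ b = (a.1 - 1, a.2) ∨ b = (a.1, a.2 + 1) ∨ b = (a.1, a.2 - 1) := by
  obtain ⟨a1, a2⟩ := a; obtain ⟨b1, b2⟩ := b
  simp only [Prod.mk.injEq]
  simp only [md] at h
  rcases abs_cases (a1 - b1) with ⟨e1, l1⟩ | ⟨e1, l1⟩ <;>
    rcases abs_cases (a2 - b2) with ⟨e2, l2⟩ | ⟨e2, l2⟩ <;> rw [e1, e2] at h <;> omega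
theorem toward (H W : Int) (s c : Int × Int) (hs : interC H W s) (hc : interC H W c)
    (h : 0 < md s c) : ∃ m, interC H W m ∧ md c m = 1 ∧ md s m + 1 = md s c := by
  obtain ⟨s1, s2⟩ := s; obtain ⟨c1, c2⟩ := c
  simp only [interC] at hs hc
  simp only [md] at h
  rcases lt_trichotomy c1 s1 with h1 | h1 | h1
  · refine ⟨(c1 + 1, c2), ⟨by omega, by omega, by omega, by omega⟩, ?_, ?_⟩ <;>
      simp only [md] <;>
      [skip; rcases abs_cases (s2 - c2) with ⟨e2, l2⟩ | ⟨e2, l2⟩] <;>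
      rcases abs_cases (s1 - (c1 + 1)) with ⟨e1, l1⟩ | ⟨e1, l1⟩ <;>
      rcases abs_cases (s1 - c1) with ⟨e3, l3⟩ | ⟨e3, l3⟩ <;>
      rcases abs_cases (c1 - (c1 + 1)) with ⟨e4, l4⟩ | ⟨e4, l4⟩ <;>
      rcases abs_cases (c2 - c2) with ⟨e5, l5⟩ | ⟨e5, l5⟩ <;> omega
  · -- c1 = s1, so the columns must differ
    rcases lt_trichotomy c2 s2 with h2 | h2 | h2
    · refine ⟨(c1, c2 + 1), ⟨by omega, by omega, by omega, by omega⟩, ?_, ?_⟩ <;>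
        simp only [md] <;>
        rcases abs_cases (s1 - c1) with ⟨e3, l3⟩ | ⟨e3, l3⟩ <;>
        rcases abs_cases (s2 - (c2 + 1)) with ⟨e1, l1⟩ | ⟨e1, l1⟩ <;>
        rcases abs_cases (s2 - c2) with ⟨e2, l2⟩ | ⟨e2, l2⟩ <;>
        rcases abs_cases (c1 - c1) with ⟨e4, l4⟩ | ⟨e4, l4⟩ <;>
        rcases abs_cases (c2 - (c2 + 1)) with ⟨e5, l5⟩ | ⟨e5, l5⟩ <;> omega
    · exfalso
      rcases abs_cases (s1 - c1) with ⟨e3, l3⟩ | ⟨e3, l3⟩ <;>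
        rcases abs_cases (s2 - c2) with ⟨e2, l2⟩ | ⟨e2, l2⟩ <;> omega
    · refine ⟨(c1, c2 - 1), ⟨by omega, by omega, by omega, by omega⟩, ?_, ?_⟩ <;>
        simp only [md] <;>
        rcases abs_cases (s1 - c1) with ⟨e3, l3⟩ | ⟨e3, l3⟩ <;>
        rcases abs_cases (s2 - (c2 - 1)) with ⟨e1, l1⟩ | ⟨e1, l1⟩ <;>
        rcases abs_cases (s2 - c2) with ⟨e2, l2⟩ | ⟨e2, l2⟩ <;>
        rcases abs_cases (c1 - c1) with ⟨e4, l4⟩ | ⟨e4, l4⟩ <;>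
        rcases abs_cases (c2 - (c2 - 1)) with ⟨e5, l5⟩ | ⟨e5, l5⟩ <;> omega
  · refine ⟨(c1 - 1, c2), ⟨by omega, by omega, by omega, by omega⟩, ?_, ?_⟩ <;>
      simp only [md] <;>
      [skip; rcases abs_cases (s2 - c2) with ⟨e2, l2⟩ | ⟨e2, l2⟩] <;>
      rcases abs_cases (s1 - (c1 - 1)) with ⟨e1, l1⟩ | ⟨e1, l1⟩ <;>
      rcases abs_cases (s1 - c1) with ⟨e3, l3⟩ | ⟨e3, l3⟩ <;>
      rcases abs_cases (c1 - (c1 - 1)) with ⟨e4, l4⟩ | ⟨e4, l4⟩ <;>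
      rcases abs_cases (c2 - c2) with ⟨e5, l5⟩ | ⟨e5, l5⟩ <;> omega

-- ---- fI facts ----
theorem fI_cons (s : Int × Int) (r : List (Int × Int)) (c : Int × Int) :
    fI (s :: r) c = (r.map (md c)).foldl min (md c s) := by
  simp [fI, List.foldl_map]

theorem fI_le_md (S : List (Int × Int)) (c s : Int × Int) (hs : s ∈ S) : fI S c ≤ md c s := by
  cases S with
  | nil => cases hs
  | cons s0 r =>
      rw [fI_cons]
      rcases List.mem_cons.mp hs with h | h
      · subst h; exact (PySem.List.foldl_min_le _ _).1
      · exact (PySem.List.foldl_min_le _ _).2 _ (List.mem_map_of_mem h)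
theorem fI_exists (S : List (Int × Int)) (c : Int × Int) (h : S ≠ []) :
    ∃ s ∈ S, fI S c = md c s := by
  cases S with
  | nil => exact absurd rfl h
  | cons s0 r =>
      rw [fI_cons]
      rcases PySem.List.foldl_min_mem (r.map (md c)) (md c s0) with h | h
      · exact ⟨s0, by simp, h⟩
      · obtain ⟨s, hs, he⟩ := List.mem_map.mp h
        exact ⟨s, by simp [hs], he.symm⟩
theorem fI_nonneg (S : List (Int × Int)) (c : Int × Int) : 0 ≤ fI S c := by
  cases S with
  | nil => simp [fI]
  | cons s0 r =>
      obtain ⟨s, _, he⟩ := fI_exists (s0 :: r) c (by simp)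
      rw [he]; exact md_nonneg c s
theorem fI_le_add (S : List (Int × Int)) (c c' : Int × Int) (h : S ≠ []) :
    fI S c ≤ fI S c' + md c c' := by
  obtain ⟨s, hs, he⟩ := fI_exists S c' h
  have h1 := fI_le_md S c s hs
  have h2 := md_triangle c c' s
  omega
theorem fI_zero_mem (S : List (Int × Int)) (c : Int × Int) (h : S ≠ []) (h0 : fI S c = 0) :
    c ∈ S := by
  obtain ⟨s, hs, he⟩ := fI_exists S c h
  have : c = s := md_zero_eq c s (by omega)
  exact this ▸ hs
theorem md_shift (a b : Int × Int) : md (shiftC a) (shiftC b) = md a b := by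
  simp only [md, shiftC]
  congr 1 <;> congr 1 <;> ring

theorem fI_shift (S : List (Int × Int)) (c : Int × Int) :
    fI (S.map shiftC) (shiftC c) = fI S c := by
  cases S with
  | nil => rfl
  | cons s0 r =>
      rw [List.map_cons, fI_cons, fI_cons, md_shift, List.map_map]
      congr 1
      apply List.map_congr_left
      intro x _
      exact md_shift c x
theorem step_down (H W : Int) (S : List (Int × Int)) (hS : ∀ s ∈ S, interC H W s)
    (hne : S ≠ []) (c : Int × Int) (hc : interC H W c) (h0 : 0 < fI S c) :
    ∃ m, interC H W m ∧ md c m = 1 ∧ fI S m + 1 = fI S c := by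
  obtain ⟨s, hs, he⟩ := fI_exists S c hne
  obtain ⟨m, hm, hmd, hstep⟩ := toward H W s c (hS s hs) hc (by rw [md_symm]; omega)
  refine ⟨m, hm, hmd, ?_⟩
  have h1 : fI S m ≤ md m s := fI_le_md S m s hs
  have h2 : fI S c ≤ fI S m + md c m := fI_le_add S c m hne
  have h3 : md m s = md s m := md_symm m s
  have h4 : md c s = md s c := md_symm c s
  omega

-- ---- grid access lemmas ----
theorem pySetD_neg_one' {α : Type} (xs : List α) (v : α) (h : 1 ≤ xs.length) :
    PySem.List.pySetD xs (-1) v = xs.set (xs.length - 1) v := by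
  simp only [PySem.List.pySetD, PySem.List.pySet?, PySem.List.pyIdx?]
  norm_num
  rw [if_pos h]
  rfl

theorem mget_toNat (g : List (List Int)) (y x : Int) (hy : 0 ≤ y) (hx : 0 ≤ x) :
    mget g y x = (g.getD y.toNat []).getD x.toNat 0 := by
  obtain ⟨n, rfl⟩ : ∃ n : Nat, y = n := ⟨y.toNat, by omega⟩
  obtain ⟨m, rfl⟩ : ∃ m : Nat, x = m := ⟨x.toNat, by omega⟩
  simp [mget]

theorem mset_toNat (g : List (List Int)) (y x v : Int) (hy : 0 ≤ y) (hx : 0 ≤ x) :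
    mset g y x v = g.set y.toNat ((g.getD y.toNat []).set x.toNat v) := by
  obtain ⟨n, rfl⟩ : ∃ n : Nat, y = n := ⟨y.toNat, by omega⟩
  obtain ⟨m, rfl⟩ : ∃ m : Nat, x = m := ⟨x.toNat, by omega⟩
  simp [mset, PySem.List.pySetD_natCast]

theorem getD_set' {α : Type} (l : List α) (i j : Nat) (a d : α) (hi : i < l.length) :
    (l.set i a).getD j d = if j = i then a else l.getD j d := by
  by_cases hj : j < l.length
  · rw [List.getD_eq_getElem _ _ (by simpa using hj), List.getElem_set]
    by_cases h : j = i
    · simp [h]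
    · rw [if_neg (fun hh => h hh.symm), if_neg h, List.getD_eq_getElem _ _ hj]
  · rw [if_neg (by omega)]
    rw [List.getD_eq_default _ _ (by simpa using (by omega : l.length ≤ j)),
      List.getD_eq_default _ _ (by omega)]

theorem getD_map' {α β : Type} (l : List α) (f : α → β) (n : Nat) (d : β) (d' : α)
    (h : n < l.length) : (l.map f).getD n d = f (l.getD n d') := by
  rw [List.getD_eq_getElem _ _ (by simpa using h), List.getD_eq_getElem _ _ h]
  simp

theorem count_set_dec (l : List Int) : ∀ (n : Nat) (v a : Int), n < l.length →
    l.getD n 0 = a → v ≠ a → (l.set n v).count a + 1 = l.count a := by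
  induction l with
  | nil => intro n v a h; simp at h
  | cons b t ih =>
      intro n v a hn hg hv
      cases n with
      | zero =>
          simp only [List.getD_cons_zero] at hg
          simp [List.set_cons_zero, hg, hv]
      | succ m =>
          simp only [List.getD_cons_succ] at hg
          have := ih m v a (by simpa using hn) hg hv
          simp only [List.set_cons_succ, List.count_cons]
          omega

theorem sum_set' (l : List Nat) : ∀ (n : Nat) (a : Nat), n < l.length →
    (l.set n a).sum + l.getD n 0 = l.sum + a := by
  induction l with
  | nil => intro n a h; simp at h
  | cons b t ih =>
      intro n a hn
      cases n with
      | zero => simp [List.set_cons_zero]; omega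
      | succ m =>
          have := ih m a (by simpa using hn)
          simp only [List.set_cons_succ, List.sum_cons, List.getD_cons_succ]
          omega

theorem mget_mset (H W : Int) (g : List (List Int)) (hg : ShapeG H W g) (y x : Int)
    (hy : 0 ≤ y) (hy2 : y < H + 2) (hx : 0 ≤ x) (hx2 : x < W + 2) (v : Int) (y' x' : Int)
    (hy' : 0 ≤ y') (hx' : 0 ≤ x') :
    mget (mset g y x v) y' x' = if y' = y ∧ x' = x then v else mget g y' x' := by
  obtain ⟨hlen, hrow⟩ := hg
  have hyn : y.toNat < g.length := by omega
  rw [mset_toNat g y x v hy hx, mget_toNat _ _ _ hy' hx', mget_toNat g _ _ hy' hx',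
    getD_set' _ _ _ _ _ hyn]
  by_cases h1 : y'.toNat = y.toNat
  · rw [if_pos h1]
    have hyy : y' = y := by omega
    rw [getD_set' _ _ _ _ _ (by
      have : g.getD y.toNat [] ∈ g := by
        rw [List.getD_eq_getElem _ _ hyn]; exact List.getElem_mem hyn
      rw [hrow _ this]; omega)]
    by_cases h2 : x'.toNat = x.toNat
    · rw [if_pos h2, if_pos ⟨hyy, by omega⟩]
    · rw [if_neg h2, if_neg (by intro hc; exact h2 (by omega)), hyy]
  · rw [if_neg h1, if_neg (by intro hc; exact h1 (by rw [hc.1]))]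
theorem shape_mset (H W : Int) (g : List (List Int)) (hg : ShapeG H W g) (y x v : Int)
    (hy : 0 ≤ y) (hx : 0 ≤ x) :
    ShapeG H W (mset g y x v) := by
  obtain ⟨hlen, hrow⟩ := hg
  rw [mset_toNat g y x v hy hx]
  by_cases hyn : y.toNat < g.length
  · constructor
    · simpa using hlen
    · intro r hr
      rcases List.mem_or_eq_of_mem_set hr with h | h
      · exact hrow r h
      · subst h
        rw [List.length_set]
        have hmem : g.getD y.toNat [] ∈ g := by
          rw [List.getD_eq_getElem _ _ hyn]; exact List.getElem_mem hyn
        exact hrow _ hmem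
  · rw [List.set_eq_of_length_le (by omega)]
    exact ⟨hlen, hrow⟩
theorem cnt_mset (H W : Int) (g : List (List Int)) (hg : ShapeG H W g) (y x : Int)
    (hy : 0 ≤ y) (hy2 : y < H + 2) (hx : 0 ≤ x) (hx2 : x < W + 2) (v : Int)
    (hold : mget g y x = -1) (hv : v ≠ -1) : cnt (mset g y x v) + 1 = cnt g := by
  obtain ⟨hlen, hrow⟩ := hg
  have hyn : y.toNat < g.length := by omega
  have hmem : g.getD y.toNat [] ∈ g := by
    rw [List.getD_eq_getElem _ _ hyn]; exact List.getElem_mem hyn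
  have hxn : x.toNat < (g.getD y.toNat []).length := by rw [hrow _ hmem]; omega
  rw [mget_toNat g y x hy hx] at hold
  unfold cnt
  rw [mset_toNat g y x v hy hx, List.map_set]
  have hsum := sum_set' (g.map (fun r => r.count (-1))) y.toNat
    (((g.getD y.toNat []).set x.toNat v).count (-1)) (by simpa using hyn)
  have hgetD : (g.map (fun r => r.count (-1))).getD y.toNat 0 =
      (g.getD y.toNat []).count (-1) := getD_map' g _ y.toNat 0 [] hyn
  have hcnt := count_set_dec (g.getD y.toNat []) x.toNat v (-1) hxn hold hv
  omega
theorem cnt_le (H W : Int) (g : List (List Int)) (hg : ShapeG H W g) :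
    cnt g ≤ (H + 2).toNat * (W + 2).toNat := by
  obtain ⟨hlen, hrow⟩ := hg
  have := sum_map_count_le g (-1) ((W + 2).toNat) (fun r hr => le_of_eq (hrow r hr))
  rw [hlen] at this
  exact this
theorem cnt_zero_lab (H W : Int) (g : List (List Int)) (hg : ShapeG H W g) (hc : cnt g = 0)
    (y x : Int) (hy : 0 ≤ y) (hy2 : y < H + 2) (hx : 0 ≤ x) (hx2 : x < W + 2) :
    mget g y x ≠ -1 := by
  obtain ⟨hlen, hrow⟩ := hg
  intro hbad
  have hyn : y.toNat < g.length := by omega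
  have hmem : g.getD y.toNat [] ∈ g := by
    rw [List.getD_eq_getElem _ _ hyn]; exact List.getElem_mem hyn
  have hxn : x.toNat < (g.getD y.toNat []).length := by rw [hrow _ hmem]; omega
  rw [mget_toNat g y x hy hx, List.getD_eq_getElem _ _ hxn] at hbad
  have hv : (-1 : Int) ∈ g.getD y.toNat [] := hbad ▸ List.getElem_mem hxn
  have hcount : (g.getD y.toNat []).count (-1) = 0 := by
    have : ∀ z ∈ g.map (fun r => r.count (-1)), z = 0 := by
      rw [← List.sum_eq_zero_iff]; exact hc
    exact this _ (List.mem_map_of_mem hmem)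
  rw [List.count_eq_zero] at hcount
  exact hcount hv
theorem mget_mem (H W : Int) (g : List (List Int)) (hg : ShapeG H W g) (y x : Int)
    (hy : 0 ≤ y) (hy2 : y < H + 2) (hx : 0 ≤ x) (hx2 : x < W + 2) :
    ∃ r ∈ g, mget g y x ∈ r := by
  obtain ⟨hlen, hrow⟩ := hg
  have hyn : y.toNat < g.length := by omega
  have hmem : g.getD y.toNat [] ∈ g := by
    rw [List.getD_eq_getElem _ _ hyn]; exact List.getElem_mem hyn
  have hxn : x.toNat < (g.getD y.toNat []).length := by rw [hrow _ hmem]; omega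
  refine ⟨g.getD y.toNat [], hmem, ?_⟩
  rw [mget_toNat g y x hy hx, List.getD_eq_getElem _ _ hxn]
  exact List.getElem_mem hxn
theorem mem_mget (H W : Int) (g : List (List Int)) (hg : ShapeG H W g) (r : List Int)
    (hr : r ∈ g) (v : Int) (hv : v ∈ r) :
    ∃ y x : Int, 0 ≤ y ∧ y < H + 2 ∧ 0 ≤ x ∧ x < W + 2 ∧ mget g y x = v := by
  obtain ⟨hlen, hrow⟩ := hg
  obtain ⟨yn, hyn, hyr⟩ := List.getElem_of_mem hr
  obtain ⟨xn, hxn, hxv⟩ := List.getElem_of_mem hv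
  refine ⟨(yn : Int), (xn : Int), by omega, by omega, by omega, ?_, ?_⟩
  · have := hrow r hr; omega
  · rw [mget_toNat g _ _ (by omega) (by omega)]
    simp only [Int.toNat_natCast]
    rw [List.getD_eq_getElem _ _ hyn, hyr, List.getD_eq_getElem _ _ hxn, hxv]

-- ---- initial state ----
theorem midRow_getD (W : Int) (hW : 0 ≤ W) (xn : Nat) (hx : xn < (W + 2).toNat) :
    ([wallConst] ++ List.replicate W.toNat (-1) ++ [wallConst]).getD xn 0 =
      if xn = 0 ∨ xn = (W + 1).toNat then wallConst else (-1) := by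
  have hform : [wallConst] ++ List.replicate W.toNat (-1) ++ [wallConst] =
      wallConst :: (List.replicate W.toNat (-1) ++ [wallConst]) := by simp
  rw [hform]
  cases xn with
  | zero => simp
  | succ k =>
      rw [List.getD_cons_succ]
      by_cases hk : k < W.toNat
      · rw [if_neg (by omega)]
        rw [List.getD_eq_getElem _ _ (by simp; omega)]
        rw [List.getElem_append_left (by simpa using hk)]
        simp
      · have hkk : k = W.toNat := by omega
        rw [if_pos (by omega)]
        subst hkk
        rw [List.getD_eq_getElem _ _ (by simp)]
        rw [List.getElem_append_right (by simp)]
        simp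

theorem initGrid_eq (H W : Int) (hH : -1 ≤ H) (hW : -1 ≤ W) :
    initGrid H W = (((PySem.List.pyRange 0 (H + 2) 1).map
        (fun _ => [wallConst] ++ List.replicate W.toNat (-1) ++ [wallConst])).set 0
        (List.replicate (W + 2).toNat wallConst)).set ((H + 1).toNat)
        (List.replicate (W + 2).toNat wallConst) := by
  unfold initGrid
  rw [PySem.List.pySetD_of_nonneg _ _ (by omega : (0:Int) ≤ 0)]
  rw [pySetD_neg_one' _ _ (by simp [PySem.List.length_pyRange_one]; omega)]
  have h2 : (((PySem.List.pyRange 0 (H + 2) 1).map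
      (fun _ => [wallConst] ++ List.replicate W.toNat (-1) ++ [wallConst])).set
      (0 : Int).toNat (List.replicate (W + 2).toNat wallConst)).length = (H + 2).toNat := by
    rw [List.length_set, List.length_map, PySem.List.length_pyRange_one]
    omega
  rw [h2, show (H + 2).toNat - 1 = (H + 1).toNat from by omega]
  rfl

theorem initGrid_shape (H W : Int) (hH : 0 ≤ H) (hW : 0 ≤ W) : ShapeG H W (initGrid H W) := by
  rw [initGrid_eq H W (by omega) (by omega)]
  constructor
  · simp [PySem.List.length_pyRange_one]
  · intro r hr
    rcases List.mem_or_eq_of_mem_set hr with hr | hr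
    · rcases List.mem_or_eq_of_mem_set hr with hr | hr
      · obtain ⟨_, _, he⟩ := List.mem_map.mp hr
        rw [← he]; simp; omega
      · rw [hr]; simp
    · rw [hr]; simp

theorem initGrid_row (H W : Int) (hH : 0 ≤ H) (hW : 0 ≤ W) (yn : Nat)
    (hy : yn < (H + 2).toNat) :
    (initGrid H W).getD yn [] =
      if yn = 0 ∨ yn = (H + 1).toNat then List.replicate (W + 2).toNat wallConst
      else [wallConst] ++ List.replicate W.toNat (-1) ++ [wallConst] := by
  rw [initGrid_eq H W (by omega) (by omega)]
  rw [getD_set' _ _ _ _ _ (by simp [PySem.List.length_pyRange_one]; omega)]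
  rw [getD_set' _ _ _ _ _ (by simp [PySem.List.length_pyRange_one]; omega)]
  by_cases h1 : yn = (H + 1).toNat
  · rw [if_pos h1, if_pos (by omega)]
  · rw [if_neg h1]
    by_cases h0 : yn = 0
    · rw [if_pos h0, if_pos (by omega)]
    · rw [if_neg h0, if_neg (by omega)]
      exact getD_map' _ _ yn [] 0 (by simp [PySem.List.length_pyRange_one]; omega)
theorem initGrid_vals (H W : Int) (hH : 0 ≤ H) (hW : 0 ≤ W) (c : Int × Int) (hc : inBox H W c) :
    mget (initGrid H W) c.1 c.2 = if interC H W c then -1 else wallConst := by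
  obtain ⟨y, x⟩ := c
  simp only [inBox] at hc
  rw [mget_toNat _ _ _ (by omega) (by omega), initGrid_row H W hH hW y.toNat (by omega)]
  by_cases hy0 : y.toNat = 0 ∨ y.toNat = (H + 1).toNat
  · rw [if_pos hy0, if_neg (by simp only [interC]; omega)]
    rw [List.getD_eq_getElem _ _ (by simp; omega)]
    simp
  · rw [if_neg hy0, midRow_getD W hW x.toNat (by omega)]
    by_cases hx0 : x.toNat = 0 ∨ x.toNat = (W + 1).toNat
    · rw [if_pos hx0, if_neg (by simp only [interC]; omega)]
    · rw [if_neg hx0, if_pos (by simp only [interC]; omega)]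
theorem srcCells_interior (H W : Int) (A : List String) (c : Int × Int)
    (hc : c ∈ srcCells H W A) : 0 ≤ c.1 ∧ c.1 < H ∧ 0 ≤ c.2 ∧ c.2 < W := by
  simp only [srcCells, List.mem_flatMap, List.mem_map, List.mem_filter,
    PySem.List.mem_pyRange_one] at hc
  obtain ⟨h, ⟨hh0, hh1⟩, w, ⟨⟨hw0, hw1⟩, _⟩, he⟩ := hc
  rw [← he]
  exact ⟨hh0, hh1, hw0, hw1⟩
theorem srcCells_len (H W : Int) (A : List String) :
    (srcCells H W A).length ≤ H.toNat * W.toNat := by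
  unfold srcCells
  have := length_flatMap_le (PySem.List.pyRange 0 H 1)
    (fun h => ((PySem.List.pyRange 0 W 1).filter (fun w => charA A h w)).map (fun w => (h, w)))
    W.toNat (fun h _ => by
      rw [List.length_map]
      calc ((PySem.List.pyRange 0 W 1).filter (fun w => charA A h w)).length
          ≤ (PySem.List.pyRange 0 W 1).length := List.length_filter_le _ _
        _ = W.toNat := by rw [PySem.List.length_pyRange_one]; omega)
  rw [PySem.List.length_pyRange_one] at this
  calc _ ≤ (H - 0).toNat * W.toNat := this
    _ = H.toNat * W.toNat := by congr 1; omega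
def initStep (A : List String) (st : List (List Int) × List (Int × Int)) (c : Int × Int) :
    List (List Int) × List (Int × Int) :=
  if charA A c.1 c.2 then (mset st.1 (c.1 + 1) (c.2 + 1) 0, st.2 ++ [(c.1 + 1, c.2 + 1)]) else st

theorem init_fold_gen (H W : Int) (A : List String) (hH : 0 ≤ H) (hW : 0 ≤ W) :
    ∀ (cs : List (Int × Int)) (st : List (List Int) × List (Int × Int)),
    (∀ c ∈ cs, 0 ≤ c.1 ∧ c.1 < H ∧ 0 ≤ c.2 ∧ c.2 < W) → ShapeG H W st.1 →
    (cs.foldl (initStep A) st).2 = st.2 ++ (cs.filter (fun c => charA A c.1 c.2)).map shiftC ∧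
    ShapeG H W (cs.foldl (initStep A) st).1 ∧
    ∀ y x : Int, inBox H W (y, x) →
      mget (cs.foldl (initStep A) st).1 y x =
        if (y, x) ∈ (cs.filter (fun c => charA A c.1 c.2)).map shiftC then 0
        else mget st.1 y x := by
  intro cs
  induction cs with
  | nil =>
      intro st _ hs
      refine ⟨by simp, hs, ?_⟩
      intro y x _
      simp
  | cons c t ih =>
      intro st hb hs
      obtain ⟨hb1, hb2, hb3, hb4⟩ := hb c (by simp)
      rw [List.foldl_cons]
      by_cases hc : charA A c.1 c.2
      · have hstep : initStep A st c =
            (mset st.1 (c.1 + 1) (c.2 + 1) 0, st.2 ++ [(c.1 + 1, c.2 + 1)]) := by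
          simp [initStep, hc]
        have hs' : ShapeG H W (initStep A st c).1 := by
          rw [hstep]
          exact shape_mset H W st.1 hs _ _ _ (by omega) (by omega)
        obtain ⟨ihq, ihs, ihv⟩ := ih (initStep A st c) (fun c' hc' => hb c' (by simp [hc'])) hs'
        have hfil : ((c :: t).filter (fun c => charA A c.1 c.2)).map shiftC =
            shiftC c :: (t.filter (fun c => charA A c.1 c.2)).map shiftC := by
          simp [hc]
        refine ⟨?_, ihs, ?_⟩
        · rw [ihq, hstep, hfil]
          simp [shiftC]
        · intro y x hyx
          rw [ihv y x hyx, hfil]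
          have hmm : mget (initStep A st c).1 y x =
              if y = c.1 + 1 ∧ x = c.2 + 1 then 0 else mget st.1 y x := by
            rw [hstep]
            exact mget_mset H W st.1 hs (c.1 + 1) (c.2 + 1) (by omega) (by omega) (by omega)
              (by omega) 0 y x (hyx.1) (hyx.2.2.1)
          by_cases h1 : (y, x) ∈ (t.filter (fun c => charA A c.1 c.2)).map shiftC
          · rw [if_pos h1, if_pos (by simp [h1])]
          · rw [if_neg h1, hmm]
            by_cases h2 : y = c.1 + 1 ∧ x = c.2 + 1
            · rw [if_pos h2, if_pos (List.mem_cons.mpr (Or.inl (by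
                simp [shiftC, h2.1, h2.2])))]
            · rw [if_neg h2, if_neg]
              intro hmem
              rcases List.mem_cons.mp hmem with hmem | hmem
              · exact h2 (by
                  simp only [shiftC, Prod.mk.injEq] at hmem
                  exact ⟨hmem.1, hmem.2⟩)
              · exact h1 hmem
      · have hstep : initStep A st c = st := by simp [initStep, hc]
        have hfil : (c :: t).filter (fun c => charA A c.1 c.2) =
            t.filter (fun c => charA A c.1 c.2) := List.filter_cons_of_neg (by simpa using hc)
        rw [hstep, hfil]
        exact ih st (fun c' hc' => hb c' (by simp [hc'])) hs

theorem filter_cells (H W : Int) (A : List String) :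
    ((PySem.List.pyRange 0 H 1).flatMap
        (fun h => (PySem.List.pyRange 0 W 1).map (fun w => (h, w)))).filter
      (fun c => charA A c.1 c.2) = srcCells H W A := by
  rw [filter_flatMap']
  unfold srcCells
  congr 1
  funext h
  rw [List.filter_map]
  congr 1

theorem initState_fold (H W : Int) (A : List String) :
    initState H W A = ((PySem.List.pyRange 0 H 1).flatMap
      (fun h => (PySem.List.pyRange 0 W 1).map (fun w => (h, w)))).foldl (initStep A)
      (initGrid H W, []) := by
  rw [foldl_flatMap']
  unfold initState
  apply PySem.List.foldl_congr_mem
  intro acc h _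
  rw [List.foldl_map]
  rfl

theorem initState_spec (H W : Int) (A : List String) (hH : 0 ≤ H) (hW : 0 ≤ W) :
    (initState H W A).2 = (srcCells H W A).map shiftC ∧ ShapeG H W (initState H W A).1 ∧
    ∀ c, inBox H W c → mget (initState H W A).1 c.1 c.2 =
      if c ∈ (srcCells H W A).map shiftC then 0
      else if interC H W c then -1 else wallConst := by
  have hb : ∀ c ∈ (PySem.List.pyRange 0 H 1).flatMap
      (fun h => (PySem.List.pyRange 0 W 1).map (fun w => (h, w))),
      0 ≤ c.1 ∧ c.1 < H ∧ 0 ≤ c.2 ∧ c.2 < W := by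
    intro c hc
    simp only [List.mem_flatMap, List.mem_map, PySem.List.mem_pyRange_one] at hc
    obtain ⟨h, ⟨h0, h1⟩, w, ⟨w0, w1⟩, he⟩ := hc
    rw [← he]
    exact ⟨h0, h1, w0, w1⟩
  obtain ⟨hq, hsh, hv⟩ := init_fold_gen H W A hH hW _ (initGrid H W, []) hb
    (initGrid_shape H W hH hW)
  rw [filter_cells] at hq hv
  rw [initState_fold H W A]
  refine ⟨by simpa using hq, hsh, ?_⟩
  intro c hc
  rw [hv c.1 c.2 (by simpa using hc)]
  by_cases hmem : c ∈ (srcCells H W A).map shiftC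
  · rw [if_pos (by simpa using hmem), if_pos hmem]
  · rw [if_neg (by simpa using hmem), if_neg hmem]
    exact initGrid_vals H W hH hW c hc

-- ---- BFS correctness ----
theorem bfsLoop_nil (fuel : Nat) (g : List (List Int)) : bfsLoop fuel (g, []) = g := by
  cases fuel <;> rfl

theorem interC_inBox (H W : Int) (c : Int × Int) (hc : interC H W c) : inBox H W c := by
  obtain ⟨h1, h2, h3, h4⟩ := hc
  exact ⟨by omega, by omega, by omega, by omega⟩

theorem minv_step (H W : Int) (S : List (Int × Int)) (hS : ∀ s ∈ S, interC H W s)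
    (hne : S ≠ []) (p : Int × Int) (hp : interC H W p) (dn : List (Int × Int)) (ij : Int × Int)
    (hij : |ij.1| + |ij.2| = 1) (st : List (List Int) × List (Int × Int))
    (hm : MBInv H W S p dn st) :
    MBInv H W S p (dn ++ [ij]) (bfsStep (fI S p) p.1 p.2 st ij) ∧
    5 * cnt (bfsStep (fI S p) p.1 p.2 st ij).1 + (bfsStep (fI S p) p.1 p.2 st ij).2.length ≤
      5 * cnt st.1 + st.2.length := by
  have hbnd : -1 ≤ ij.1 ∧ ij.1 ≤ 1 ∧ -1 ≤ ij.2 ∧ ij.2 ≤ 1 := by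
    rcases abs_cases ij.1 with ⟨e1, _⟩ | ⟨e1, _⟩ <;>
      rcases abs_cases ij.2 with ⟨e2, _⟩ | ⟨e2, _⟩ <;> omega
  obtain ⟨hp1, hp2, hp3, hp4⟩ := hp
  have hnbox : inBox H W (p.1 + ij.1, p.2 + ij.2) := ⟨by omega, by omega, by omega, by omega⟩
  have hmd : md p (p.1 + ij.1, p.2 + ij.2) = 1 := by
    simp only [md]
    rcases abs_cases (p.1 - (p.1 + ij.1)) with ⟨e1, _⟩ | ⟨e1, _⟩ <;>
      rcases abs_cases (p.2 - (p.2 + ij.2)) with ⟨e2, _⟩ | ⟨e2, _⟩ <;>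
      rcases abs_cases ij.1 with ⟨e3, _⟩ | ⟨e3, _⟩ <;>
      rcases abs_cases ij.2 with ⟨e4, _⟩ | ⟨e4, _⟩ <;> omega
  have hbs : bfsStep (fI S p) p.1 p.2 st ij =
      if mget st.1 (p.1 + ij.1) (p.2 + ij.2) = -1 then
        (mset st.1 (p.1 + ij.1) (p.2 + ij.2) (fI S p + 1), st.2 ++ [(p.1 + ij.1, p.2 + ij.2)])
      else st := rfl
  have hfp0 : 0 ≤ fI S p := fI_nonneg S p
  by_cases hlab : mget st.1 (p.1 + ij.1) (p.2 + ij.2) = -1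
  · -- the neighbour is fresh: label it and push it
    rw [hbs, if_pos hlab]
    have hsh' : ShapeG H W (mset st.1 (p.1 + ij.1) (p.2 + ij.2) (fI S p + 1)) :=
      shape_mset H W st.1 hm.shape _ _ _ (by omega) (by omega)
    have hval : ∀ y x : Int, 0 ≤ y → 0 ≤ x →
        mget (mset st.1 (p.1 + ij.1) (p.2 + ij.2) (fI S p + 1)) y x =
        if y = p.1 + ij.1 ∧ x = p.2 + ij.2 then fI S p + 1 else mget st.1 y x :=
      fun y x hy hx => mget_mset H W st.1 hm.shape _ _ (by omega) (by omega) (by omega)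
        (by omega) _ y x hy hx
    have hnint : interC H W (p.1 + ij.1, p.2 + ij.2) := by
      by_contra hni
      have hw : mget st.1 (p.1 + ij.1) (p.2 + ij.2) = wallConst := hm.border _ hnbox hni
      rw [hw] at hlab
      exact (by decide : wallConst ≠ -1) hlab
    have hcov : ∀ c : Int × Int, interC H W c → fI S c ≤ fI S p →
        mget st.1 c.1 c.2 ≠ -1 := hm.covered
    have hfge : fI S p + 1 ≤ fI S (p.1 + ij.1, p.2 + ij.2) := by
      by_contra hlt
      exact hcov _ hnint (by omega) hlab
    have hfle : fI S (p.1 + ij.1, p.2 + ij.2) ≤ fI S p + 1 := by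
      have h1 := fI_le_add S (p.1 + ij.1, p.2 + ij.2) p hne
      have h2 : md (p.1 + ij.1, p.2 + ij.2) p = 1 := by rw [md_symm]; exact hmd
      omega
    have hfn : fI S (p.1 + ij.1, p.2 + ij.2) = fI S p + 1 := by omega
    have hpres : ∀ c : Int × Int, 0 ≤ c.1 → 0 ≤ c.2 → mget st.1 c.1 c.2 ≠ -1 →
        mget (mset st.1 (p.1 + ij.1) (p.2 + ij.2) (fI S p + 1)) c.1 c.2 ≠ -1 := by
      intro c h1 h2 hl
      rw [hval c.1 c.2 h1 h2]
      split_ifs with h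
      · omega
      · exact hl
    have hlabn : mget (mset st.1 (p.1 + ij.1) (p.2 + ij.2) (fI S p + 1))
        (p.1 + ij.1) (p.2 + ij.2) = fI S p + 1 := by
      rw [hval _ _ (by omega) (by omega), if_pos ⟨rfl, rfl⟩]
    refine ⟨⟨hsh', ?_, ?_, ?_, ?_, ?_, ?_, ?_, ?_, ?_⟩, ?_⟩
    · -- border
      intro c hc hni
      have hv := hval c.1 c.2 hc.1 hc.2.2.1
      rw [hv, if_neg (by
        rintro ⟨h1, h2⟩
        exact hni (by
          have hcn : c = (p.1 + ij.1, p.2 + ij.2) := Prod.ext h1 h2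
          rw [hcn]; exact hnint))]
      exact hm.border c hc hni
    · -- vals
      intro c hc
      have hbox := interC_inBox H W c hc
      rw [hval c.1 c.2 hbox.1 hbox.2.2.1]
      split_ifs with h
      · right
        have hcn : c = (p.1 + ij.1, p.2 + ij.2) := Prod.ext h.1 h.2
        rw [hcn, hfn]
      · exact hm.vals c hc
    · -- src
      intro s hs
      have hbox := interC_inBox H W s (hS s hs)
      exact hpres s hbox.1 hbox.2.2.1 (hm.src s hs)
    · -- qint
      intro c hcm
      rcases List.mem_append.mp hcm with h | h
      · obtain ⟨hi, hl⟩ := hm.qint c h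
        have hbox := interC_inBox H W c hi
        exact ⟨hi, hpres c hbox.1 hbox.2.2.1 hl⟩
      · rw [List.mem_singleton.mp h]
        refine ⟨hnint, ?_⟩
        show mget _ (p.1 + ij.1) (p.2 + ij.2) ≠ -1
        rw [hlabn]
        omega
    · -- qd
      intro c hcm
      rcases List.mem_append.mp hcm with h | h
      · exact hm.qd c h
      · rw [List.mem_singleton.mp h, hfn]
        omega
    · -- qsort
      rw [List.pairwise_append]
      refine ⟨hm.qsort, List.pairwise_singleton _ _, ?_⟩
      intro a ha b hb
      rw [List.mem_singleton.mp hb, hfn]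
      have := hm.qd a ha
      omega
    · -- covered
      intro c hc hle
      have hbox := interC_inBox H W c hc
      exact hpres c hbox.1 hbox.2.2.1 (hm.covered c hc hle)
    · -- done5
      intro c hc hcl hcq hcp
      have hbox := interC_inBox H W c hc
      have hcq1 : c ∉ st.2 := fun h => hcq (List.mem_append.mpr (Or.inl h))
      have hcn : c ≠ (p.1 + ij.1, p.2 + ij.2) :=
        fun h => hcq (List.mem_append.mpr (Or.inr (by rw [h]; simp)))
      have hcl0 : mget st.1 c.1 c.2 ≠ -1 := by
        have hcl2 : mget (mset st.1 (p.1 + ij.1) (p.2 + ij.2) (fI S p + 1)) c.1 c.2 ≠ -1 := hcl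
        rw [hval c.1 c.2 hbox.1 hbox.2.2.1, if_neg (by
          rintro ⟨h1, h2⟩
          exact hcn (Prod.ext h1 h2))] at hcl2
        exact hcl2
      intro n hmd1 hni
      have hnbox2 := interC_inBox H W n hni
      exact hpres n hnbox2.1 hnbox2.2.2.1 (hm.done5 c hc hcl0 hcq1 hcp n hmd1 hni)
    · -- procd
      intro ij' hij' hint
      rcases List.mem_append.mp hij' with h | h
      · have hbox2 := interC_inBox H W _ hint
        exact hpres _ hbox2.1 hbox2.2.2.1 (hm.procd ij' h hint)
      · rw [List.mem_singleton.mp h]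
        show mget _ (p.1 + ij.1) (p.2 + ij.2) ≠ -1
        rw [hlabn]
        omega
    · -- measure
      have hcnt := cnt_mset H W st.1 hm.shape (p.1 + ij.1) (p.2 + ij.2) (by omega) (by omega)
        (by omega) (by omega) (fI S p + 1) hlab (by omega)
      simp only [List.length_append, List.length_singleton]
      omega
  · rw [hbs, if_neg hlab]
    refine ⟨⟨hm.shape, hm.border, hm.vals, hm.src, hm.qint, hm.qd, hm.qsort, hm.covered,
      hm.done5, ?_⟩, by omega⟩
    intro ij' hij' hint
    rcases List.mem_append.mp hij' with h | h
    · exact hm.procd ij' h hint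
    · rw [List.mem_singleton.mp h]
      exact hlab

theorem minv_fold (H W : Int) (S : List (Int × Int)) (hS : ∀ s ∈ S, interC H W s)
    (hne : S ≠ []) (p : Int × Int) (hp : interC H W p) :
    ∀ (dirs : List (Int × Int)) (dn : List (Int × Int))
      (st : List (List Int) × List (Int × Int)),
    (∀ ij ∈ dirs, |ij.1| + |ij.2| = 1) → MBInv H W S p dn st →
    MBInv H W S p (dn ++ dirs) (dirs.foldl (bfsStep (fI S p) p.1 p.2) st) ∧
    5 * cnt (dirs.foldl (bfsStep (fI S p) p.1 p.2) st).1 +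
      (dirs.foldl (bfsStep (fI S p) p.1 p.2) st).2.length ≤ 5 * cnt st.1 + st.2.length := by
  intro dirs
  induction dirs with
  | nil =>
      intro dn st _ hm
      refine ⟨by simpa using hm, by simp⟩
  | cons ij rest ih =>
      intro dn st hu hm
      obtain ⟨hm1, hme1⟩ := minv_step H W S hS hne p hp dn ij (hu ij (by simp)) st hm
      obtain ⟨hm2, hme2⟩ := ih (dn ++ [ij]) _ (fun i hi => hu i (by simp [hi])) hm1
      rw [List.foldl_cons]
      constructor
      · have hdn : dn ++ ij :: rest = (dn ++ [ij]) ++ rest := by simp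
        rw [hdn]
        exact hm2
      · omega

theorem pop_minv (H W : Int) (S : List (Int × Int)) (g : List (List Int))
    (p : Int × Int) (t : List (Int × Int)) (hInv : BInv H W S g (p :: t)) :
    MBInv H W S p [] (g, t) := by
  have hpair := List.pairwise_cons.mp hInv.qsort
  refine ⟨hInv.shape, hInv.border, hInv.vals, hInv.src, ?_, ?_, hpair.2, ?_, ?_, ?_⟩
  · intro c hc
    exact hInv.qint c (by simp [hc])
  · intro c hc
    exact hpair.1 c hc
  · intro c hc hle
    exact hInv.frontier p t rfl c hc hle
  · intro c hc hcl hcq hcp n h1 h2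
    exact hInv.done c hc hcl (by
      intro hmem
      rcases List.mem_cons.mp hmem with h | h
      · exact hcp h
      · exact hcq h) n h1 h2
  · intro ij h
    cases h

theorem minv_close (H W : Int) (S : List (Int × Int)) (hS : ∀ s ∈ S, interC H W s)
    (hne : S ≠ []) (p : Int × Int) (hp : interC H W p)
    (st : List (List Int) × List (Int × Int))
    (hm : MBInv H W S p [((1:Int),(0:Int)),(-1,0),(0,1),(0,-1)] st) :
    BInv H W S st.1 st.2 := by
  have hnb : ∀ n, md p n = 1 → interC H W n → Lab st.1 n := by
    intro n h1 h2
    rcases md_one_cases p n h1 with h | h | h | h <;> rw [h] at h2 ⊢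
    · have hx := hm.procd (1, 0) (by simp) (by simpa using h2)
      simpa using hx
    · have hx := hm.procd (-1, 0) (by simp) (by simpa using h2)
      simpa using hx
    · have hx := hm.procd (0, 1) (by simp) (by simpa using h2)
      simpa using hx
    · have hx := hm.procd (0, -1) (by simp) (by simpa using h2)
      simpa using hx
  refine ⟨hm.shape, hm.border, hm.vals, hm.src, hm.qint, hm.qsort, ?_, ?_⟩
  · -- frontier
    intro p1 t1 hq c hc hle
    have hp1m : p1 ∈ st.2 := by rw [hq]; simp
    obtain ⟨hd1, hd2⟩ := hm.qd p1 hp1m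
    by_cases hc1 : fI S c ≤ fI S p
    · exact hm.covered c hc hc1
    · have hfc : fI S c = fI S p + 1 := by omega
      have hfcpos : 0 < fI S c := by
        have := fI_nonneg S p
        omega
      obtain ⟨m, hmI, hm1, hstep⟩ := step_down H W S hS hne c hc hfcpos
      have hmlab : Lab st.1 m := hm.covered m hmI (by omega)
      have hmnq : m ∉ st.2 := by
        intro hmem
        rw [hq] at hmem
        rcases List.mem_cons.mp hmem with h | h
        · rw [h] at hstep
          omega
        · have hq2 : st.2.Pairwise (fun a b => fI S a ≤ fI S b ∧ fI S b ≤ fI S a + 1) :=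
            hm.qsort
          rw [hq] at hq2
          have := (List.pairwise_cons.mp hq2).1 m h
          omega
      by_cases hmp : m = p
      · rw [hmp] at hm1
        exact hnb c (by rw [md_symm]; exact hm1) hc
      · exact hm.done5 m hmI hmlab hmnq hmp c (by rw [md_symm]; exact hm1) hc
  · -- done
    intro c hc hcl hcq n h1 h2
    by_cases hcp : c = p
    · rw [hcp] at h1
      exact hnb n h1 h2
    · exact hm.done5 c hc hcl hcq hcp n h1 h2

theorem inv_empty_all (H W : Int) (S : List (Int × Int)) (hS : ∀ s ∈ S, interC H W s)
    (hne : S ≠ []) (g : List (List Int)) (hInv : BInv H W S g []) :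
    ∀ c, interC H W c → Lab g c := by
  obtain ⟨s0, hs0⟩ : ∃ s, s ∈ S := by
    cases S with
    | nil => exact absurd rfl hne
    | cons a t => exact ⟨a, by simp⟩
  have hlabS : Lab g s0 := hInv.src s0 hs0
  have key : ∀ k : Nat, ∀ c, interC H W c → (md s0 c).toNat = k → Lab g c := by
    intro k
    induction k using Nat.strong_induction_on with
    | _ k ih =>
        intro c hc hk
        by_cases h0 : md s0 c = 0
        · have heq : s0 = c := md_zero_eq s0 c h0
          rw [← heq]
          exact hlabS
        · have hpos : 0 < md s0 c := by
            have := md_nonneg s0 c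
            omega
          obtain ⟨m, hmI, hm1, hstep⟩ := toward H W s0 c (hS s0 hs0) hc hpos
          have hmd0 : 0 ≤ md s0 m := md_nonneg s0 m
          have hlm : Lab g m := ih (md s0 m).toNat (by omega) m hmI rfl
          exact hInv.done m hmI hlm (by simp) c (by rw [md_symm]; exact hm1) hc
  exact fun c hc => key (md s0 c).toNat c hc rfl

theorem bfs_run
 (H W : Int) (S : List (Int × Int)) (hS : ∀ s ∈ S, interC H W s)
    (hne : S ≠ []) :
    ∀ fuel g q, BInv H W S g q → 5 * cnt g + q.length ≤ fuel →
      ShapeG H W (bfsLoop fuel (g, q)) ∧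
      ∀ c, inBox H W c → mget (bfsLoop fuel (g, q)) c.1 c.2 =
        if interC H W c then fI S c else wallConst := by
  have hfinal : ∀ g : List (List Int), BInv H W S g [] → (∀ c, interC H W c → Lab g c) →
      ∀ c, inBox H W c → mget g c.1 c.2 = if interC H W c then fI S c else wallConst := by
    intro g hInv hall c hc
    by_cases hi : interC H W c
    · rw [if_pos hi]
      rcases hInv.vals c hi with h | h
      · exact absurd h (hall c hi)
      · exact h
    · rw [if_neg hi]
      exact hInv.border c hc hi
  intro fuel
  induction fuel with
  | zero =>
      intro g q hInv hfl
      have hq : q = [] := by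
        cases q with
        | nil => rfl
        | cons a t => simp at hfl
      subst hq
      rw [bfsLoop_nil]
      refine ⟨hInv.shape, ?_⟩
      have hc0 : cnt g = 0 := by omega
      apply hfinal g hInv
      intro c hc
      have hbox := interC_inBox H W c hc
      exact cnt_zero_lab H W g hInv.shape hc0 c.1 c.2 hbox.1 (by omega) hbox.2.2.1 (by omega)
  | succ f ih =>
      intro g q hInv hfl
      cases q with
      | nil =>
          rw [bfsLoop_nil]
          exact ⟨hInv.shape, hfinal g hInv (inv_empty_all H W S hS hne g hInv)⟩
      | cons p t =>
          obtain ⟨ph, pw⟩ := p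
          obtain ⟨hpI, hpLab⟩ := hInv.qint (ph, pw) (by simp)
          have hd : mget g ph pw = fI S (ph, pw) := by
            rcases hInv.vals (ph, pw) hpI with h | h
            · exact absurd h hpLab
            · exact h
          have hstep : bfsLoop (f + 1) (g, (ph, pw) :: t) =
              bfsLoop f ([((1:Int),(0:Int)),(-1,0),(0,1),(0,-1)].foldl
                (bfsStep (mget g ph pw) ph pw) (g, t)) := rfl
          rw [hstep, hd]
          have hm0 := pop_minv H W S g (ph, pw) t hInv
          obtain ⟨hm, hmeas⟩ := minv_fold H W S hS hne (ph, pw) hpI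
            [((1:Int),(0:Int)),(-1,0),(0,1),(0,-1)] [] (g, t) (by decide) hm0
          rw [List.nil_append] at hm
          have hInv2 := minv_close H W S hS hne (ph, pw) hpI _ hm
          have hmeas2 : 5 * cnt ([((1:Int),(0:Int)),(-1,0),(0,1),(0,-1)].foldl
              (bfsStep (fI S (ph, pw)) ph pw) (g, t)).1 +
              ([((1:Int),(0:Int)),(-1,0),(0,1),(0,-1)].foldl
              (bfsStep (fI S (ph, pw)) ph pw) (g, t)).2.length ≤ 5 * cnt g + t.length := hmeas
          have hfl2 : 5 * cnt ([((1:Int),(0:Int)),(-1,0),(0,1),(0,-1)].foldl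
              (bfsStep (fI S (ph, pw)) ph pw) (g, t)).1 +
              ([((1:Int),(0:Int)),(-1,0),(0,1),(0,-1)].foldl
              (bfsStep (fI S (ph, pw)) ph pw) (g, t)).2.length ≤ f := by
            simp only [List.length_cons] at hfl
            omega
          exact ih _ _ hInv2 hfl2


-- ---- B-side characterisation ----
theorem srcB_eq (H W : Int) (A : List String) : srcB H W A = srcCells H W A := by
  unfold srcB srcCells
  have hinner : ∀ (acc : List (Int × Int)) (h : Int),
      (PySem.List.pyRange 0 W 1).foldl (fun acc w =>
        if charB A h w then acc ++ [(h, w)] else acc) acc =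
      acc ++ ((PySem.List.pyRange 0 W 1).filter (fun w => charA A h w)).map (fun w => (h, w)) := by
    intro acc h
    exact PySem.List.foldl_append_if _ _ _ _
  calc (PySem.List.pyRange 0 H 1).foldl (fun acc h =>
        (PySem.List.pyRange 0 W 1).foldl (fun acc w =>
          if charB A h w then acc ++ [(h, w)] else acc) acc) []
      = (PySem.List.pyRange 0 H 1).foldl (fun acc h => acc ++
          ((PySem.List.pyRange 0 W 1).filter (fun w => charA A h w)).map (fun w => (h, w))) [] :=
        PySem.List.foldl_congr_mem _ _ _ _ (fun acc x _ => hinner acc x)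
    _ = [] ++ (PySem.List.pyRange 0 H 1).flatMap (fun h =>
          ((PySem.List.pyRange 0 W 1).filter (fun w => charA A h w)).map (fun w => (h, w))) :=
        PySem.List.foldl_append_eq_flatMap _ _ _
    _ = _ := by simp
theorem mem_cellsHW (H W : Int) (c : Int × Int) :
    c ∈ cellsHW H W ↔ 0 ≤ c.1 ∧ c.1 < H ∧ 0 ≤ c.2 ∧ c.2 < W := by
  simp only [cellsHW, List.mem_flatMap, List.mem_map, PySem.List.mem_pyRange_one]
  constructor
  · rintro ⟨h, ⟨hh0, hh1⟩, w, ⟨hw0, hw1⟩, he⟩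
    rw [← he]
    exact ⟨hh0, hh1, hw0, hw1⟩
  · rintro ⟨h1, h2, h3, h4⟩
    exact ⟨c.1, ⟨h1, h2⟩, c.2, ⟨h3, h4⟩, rfl⟩
theorem fI_port (S : List (Int × Int)) (c : Int × Int) (hne : S ≠ []) :
    (PySem.List.min? (S.map (fun (s : Int × Int) => |c.1 - s.1| + |c.2 - s.2|))
      (fun v => v)).getD 0 = fI S c := by
  cases S with
  | nil => exact absurd rfl hne
  | cons s r =>
      rw [List.map_cons, PySem.List.min?_id_cons]
      rw [fI_cons]
      rfl

theorem if_lt_max (a b : Int) : (if a < b then b else a) = max a b := by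
  rcases le_total b a with h | h <;> simp [max_def] <;> omega

theorem fI_port' (S : List (Int × Int)) (h w : Int) (hne : S ≠ []) :
    (PySem.List.min? (S.map (fun (s : Int × Int) => |h - s.1| + |w - s.2|))
      (fun v => v)).getD 0 = fI S (h, w) := fI_port S (h, w) hne

theorem fold_max_const {α : Type} (b : Int) :
    ∀ (l : List α) (a : Int), l.foldl (fun acc _ => max acc b) a =
      if l = [] then a else max a b := by
  intro l
  induction l with
  | nil => intro a; simp
  | cons x t ih =>
      intro a
      rw [List.foldl_cons, ih]
      by_cases h : t = []
      · simp [h]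
      · rw [if_neg h, if_neg (by simp), max_assoc, max_self]

theorem pyRange_ne_nil (n : Int) (hn : 1 ≤ n) : PySem.List.pyRange 0 n 1 ≠ [] := by
  intro h
  have hl := PySem.List.length_pyRange_one 0 n
  rw [h] at hl
  simp at hl
  omega

theorem solve_alt_eq (H W : Int) (A : List String) (hne : srcCells H W A ≠ []) :
    solve_alt H W A = ((cellsHW H W).map (fI (srcCells H W A))).foldl max wallConst := by
  have h : solve_alt H W A =
      ((cellsHW H W).map (fI (srcCells H W A))).foldl max (-(10 ^ 7)) := by
    unfold solve_alt
    simp only [srcB_eq]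
    rw [List.foldl_map, cellsHW, foldl_flatMap']
    apply PySem.List.foldl_congr_mem
    intro acc h _
    rw [List.foldl_map]
    apply PySem.List.foldl_congr_mem
    intro acc2 w _
    simp only [if_neg hne, fI_port' (srcCells H W A) h w hne, if_lt_max]
  exact h

theorem solve_alt_nosrc (H W : Int) (A : List String) (hH : 1 ≤ H) (hW : 1 ≤ W)
    (hsrc : srcCells H W A = []) : solve_alt H W A = -1 := by
  have hWne := pyRange_ne_nil W hW
  have hHne := pyRange_ne_nil H hH
  have h : solve_alt H W A = -1 := by
    unfold solve_alt
    simp only [srcB_eq]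
    have hinner : ∀ (acc : Int) (h : Int), (PySem.List.pyRange 0 W 1).foldl (fun best w =>
        let d := if srcCells H W A = [] then (-1 : Int) else
          (PySem.List.min? ((srcCells H W A).map
            (fun (s : Int × Int) => |h - s.1| + |w - s.2|)) (fun v => v)).getD 0
        if best < d then d else best) acc = max acc (-1) := by
      intro acc h
      have hc : (PySem.List.pyRange 0 W 1).foldl (fun best w =>
          let d := if srcCells H W A = [] then (-1 : Int) else
            (PySem.List.min? ((srcCells H W A).map
              (fun (s : Int × Int) => |h - s.1| + |w - s.2|)) (fun v => v)).getD 0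
          if best < d then d else best) acc =
          (PySem.List.pyRange 0 W 1).foldl (fun best _ => max best (-1)) acc := by
        apply PySem.List.foldl_congr_mem
        intro acc2 w _
        simp only [if_pos hsrc, if_lt_max]
      rw [hc, fold_max_const, if_neg hWne]
    have houter : (PySem.List.pyRange 0 H 1).foldl (fun best h =>
        (PySem.List.pyRange 0 W 1).foldl (fun best w =>
          let d := if srcCells H W A = [] then (-1 : Int) else
            (PySem.List.min? ((srcCells H W A).map
              (fun (s : Int × Int) => |h - s.1| + |w - s.2|)) (fun v => v)).getD 0
          if best < d then d else best) best) (-(10 ^ 7)) =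
        (PySem.List.pyRange 0 H 1).foldl (fun best _ => max best (-1)) (-(10 ^ 7)) :=
      PySem.List.foldl_congr_mem _ _ _ _ (fun acc x _ => hinner acc x)
    rw [houter, fold_max_const, if_neg hHne]
    decide
  exact h

-- ---- A-side max over the grid ----
theorem gridMax_spec (H W : Int) (g : List (List Int)) (hg : ShapeG H W g)
    (hH : 0 ≤ H) (hW : 0 ≤ W) :
    (∀ c : Int × Int, inBox H W c → mget g c.1 c.2 ≤ rowMax (g.map rowMax)) ∧
    (∃ c : Int × Int, inBox H W c ∧ rowMax (g.map rowMax) = mget g c.1 c.2) := by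
  obtain ⟨hlen, hrow⟩ := hg
  have hgne : g ≠ [] := by
    intro h; subst h; simp at hlen; omega
  constructor
  · intro c hc
    obtain ⟨hc1, hc2, hc3, hc4⟩ := hc
    obtain ⟨r, hr, hv⟩ := mget_mem H W g ⟨hlen, hrow⟩ c.1 c.2 hc1 (by omega) hc3 (by omega)
    calc mget g c.1 c.2 ≤ rowMax r := rowMax_ge r _ hv
      _ ≤ rowMax (g.map rowMax) := rowMax_ge _ _ (List.mem_map_of_mem hr)
  · have hm := rowMax_mem (g.map rowMax) (by simpa using hgne)
    obtain ⟨r, hr, he⟩ := List.mem_map.mp hm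
    have hrne : r ≠ [] := by
      intro h
      have := hrow r hr
      subst h; simp at this; omega
    have hv := rowMax_mem r hrne
    obtain ⟨y, x, h1, h2, h3, h4, h5⟩ := mem_mget H W g ⟨hlen, hrow⟩ r hr _ hv
    exact ⟨(y, x), ⟨h1, by omega, h3, by omega⟩, by rw [← he, h5]⟩

-- ---- main equivalence off D_ ----
theorem pairwise_of_all {α : Type} (R : α → α → Prop) :
    ∀ (l : List α), (∀ a ∈ l, ∀ b ∈ l, R a b) → l.Pairwise R := by
  intro l
  induction l with
  | nil => intro _; exact List.Pairwise.nil
  | cons a t ih =>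
      intro h
      constructor
      · exact fun b hb => h a (by simp) b (by simp [hb])
      · exact ih (fun x hx y hy => h x (by simp [hx]) y (by simp [hy]))

theorem SS_interior (H W : Int) (A : List String) :
    ∀ s ∈ (srcCells H W A).map shiftC, interC H W s := by
  intro s hs
  obtain ⟨c, hc, he⟩ := List.mem_map.mp hs
  obtain ⟨h1, h2, h3, h4⟩ := srcCells_interior H W A c hc
  rw [← he]
  exact ⟨by simp [shiftC]; omega, by simp [shiftC]; omega,
    by simp [shiftC]; omega, by simp [shiftC]; omega⟩

theorem fI_mem_zero (S : List (Int × Int)) (s : Int × Int) (hs : s ∈ S) : fI S s = 0 := by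
  have h1 := fI_le_md S s s hs
  have h2 := fI_nonneg S s
  have h3 := md_self s
  omega

theorem init_inv (H W : Int) (A : List String) (hH : 1 ≤ H) (hW : 1 ≤ W)
    (hne : (srcCells H W A).map shiftC ≠ []) :
    BInv H W ((srcCells H W A).map shiftC) (initState H W A).1 (initState H W A).2 := by
  obtain ⟨hq, hsh, hv⟩ := initState_spec H W A (by omega) (by omega)
  refine ⟨hsh, ?_, ?_, ?_, ?_, ?_, ?_, ?_⟩
  · intro c hc hni
    rw [hv c hc, if_neg (fun hmem => hni (SS_interior H W A c hmem)), if_neg hni]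
  · intro c hc
    rw [hv c (interC_inBox H W c hc)]
    by_cases hmem : c ∈ (srcCells H W A).map shiftC
    · rw [if_pos hmem]
      right
      exact (fI_mem_zero _ c hmem).symm
    · rw [if_neg hmem, if_pos hc]
      left
      rfl
  · intro s hs
    show mget (initState H W A).1 s.1 s.2 ≠ -1
    rw [hv s (interC_inBox H W s (SS_interior H W A s hs)), if_pos hs]
    omega
  · intro c hc
    rw [hq] at hc
    have hi := SS_interior H W A c hc
    refine ⟨hi, ?_⟩
    show mget (initState H W A).1 c.1 c.2 ≠ -1
    rw [hv c (interC_inBox H W c hi), if_pos hc]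
    omega
  · rw [hq]
    apply pairwise_of_all
    intro a ha b hb
    rw [fI_mem_zero _ a ha, fI_mem_zero _ b hb]
    omega
  · intro p t hqe c hc hle
    have hSSpt : (srcCells H W A).map shiftC = p :: t := by rw [← hq, hqe]
    have hpm : p ∈ (srcCells H W A).map shiftC := by rw [hSSpt]; simp
    have hfp : fI ((srcCells H W A).map shiftC) p = 0 := fI_mem_zero _ p hpm
    have hf0 := fI_nonneg ((srcCells H W A).map shiftC) c
    have hfc : fI ((srcCells H W A).map shiftC) c = 0 := by omega
    have hmem : c ∈ (srcCells H W A).map shiftC := fI_zero_mem _ c hne hfc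
    show mget (initState H W A).1 c.1 c.2 ≠ -1
    rw [hv c (interC_inBox H W c hc), if_pos hmem]
    omega
  · intro c hc hcl hcq n h1 h2
    exfalso
    have hmem : c ∈ (srcCells H W A).map shiftC := by
      by_contra hmem
      have hval2 : mget (initState H W A).1 c.1 c.2 = -1 := by
        rw [hv c (interC_inBox H W c hc), if_neg hmem, if_pos hc]
      exact hcl hval2
    exact hcq (by rw [hq]; exact hmem)

theorem main_eq (H W : Int) (A : List String) (hH : 1 ≤ H) (hW : 1 ≤ W) :
    solve H W A = solve_alt H W A := by
  obtain ⟨hq, hsh, hv⟩ := initState_spec H W A (by omega) (by omega)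
  by_cases hsrc : srcCells H W A = []
  · rw [solve_alt_nosrc H W A hH hW hsrc]
    show rowMax ((bfsLoop (6 * ((H + 2).toNat * (W + 2).toNat) + 1)
      (initState H W A)).map rowMax) = -1
    have hqnil : (initState H W A).2 = [] := by rw [hq, hsrc]; rfl
    have hbl : bfsLoop (6 * ((H + 2).toNat * (W + 2).toNat) + 1) (initState H W A) =
        (initState H W A).1 := by
      have hpair : initState H W A = ((initState H W A).1, []) := by
        rw [← hqnil]
      rw [hpair]
      exact bfsLoop_nil _ _
    rw [hbl]
    have hvals : ∀ c, inBox H W c → mget (initState H W A).1 c.1 c.2 =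
        if interC H W c then -1 else wallConst := by
      intro c hc
      rw [hv c hc, if_neg (by rw [hsrc]; simp)]
    obtain ⟨hub, c0, hc0, he0⟩ := gridMax_spec H W _ hsh (by omega) (by omega)
    have h11 : interC H W (1, 1) := ⟨by omega, by omega, by omega, by omega⟩
    have hge : (-1 : Int) ≤ rowMax ((initState H W A).1.map rowMax) := by
      have hx := hub (1, 1) (interC_inBox H W _ h11)
      rw [hvals (1, 1) (interC_inBox H W _ h11), if_pos h11] at hx
      omega
    have hval0 : rowMax ((initState H W A).1.map rowMax) =
        if interC H W c0 then -1 else wallConst := by rw [he0, hvals c0 hc0]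
    split_ifs at hval0 with h
    · exact hval0
    · exfalso
      rw [hval0] at hge
      exact (by decide : ¬ (-1 : Int) ≤ wallConst) hge
  · have hSSne : (srcCells H W A).map shiftC ≠ [] := by simpa using hsrc
    have hInv := init_inv H W A hH hW hSSne
    have hcnt := cnt_le H W _ hsh
    have hlen : (initState H W A).2.length = (srcCells H W A).length := by
      rw [hq, List.length_map]
    have hsl := srcCells_len H W A
    have hm1 : H.toNat * W.toNat ≤ (H + 2).toNat * (W + 2).toNat :=
      Nat.mul_le_mul (by omega) (by omega)
    have hmeas : 5 * cnt (initState H W A).1 + (initState H W A).2.length ≤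
        6 * ((H + 2).toNat * (W + 2).toNat) + 1 := by omega
    obtain ⟨hshF, hvF⟩ := bfs_run H W _ (SS_interior H W A) hSSne
      (6 * ((H + 2).toNat * (W + 2).toNat) + 1) (initState H W A).1 (initState H W A).2
      hInv hmeas
    have hshF2 : ShapeG H W (bfsLoop (6 * ((H + 2).toNat * (W + 2).toNat) + 1)
      (initState H W A)) := hshF
    have hvF2 : ∀ c, inBox H W c →
        mget (bfsLoop (6 * ((H + 2).toNat * (W + 2).toNat) + 1) (initState H W A)) c.1 c.2 =
        if interC H W c then fI ((srcCells H W A).map shiftC) c else wallConst := hvF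
    show rowMax ((bfsLoop (6 * ((H + 2).toNat * (W + 2).toNat) + 1)
      (initState H W A)).map rowMax) = solve_alt H W A
    rw [solve_alt_eq H W A hsrc]
    obtain ⟨hub, c0, hc0, he0⟩ := gridMax_spec H W _ hshF2 (by omega) (by omega)
    have hfold := PySem.List.le_foldl_max ((cellsHW H W).map (fI (srcCells H W A))) wallConst
    have hmem := PySem.List.foldl_max_mem ((cellsHW H W).map (fI (srcCells H W A))) wallConst
    apply le_antisymm
    · rw [he0, hvF2 c0 hc0]
      split_ifs with h
      · obtain ⟨ha, hb, hc, hd⟩ := h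
        have hc0' : ((c0.1 - 1 : Int), (c0.2 - 1 : Int)) ∈ cellsHW H W :=
          (mem_cellsHW H W _).mpr ⟨show (0:Int) ≤ c0.1 - 1 from by omega,
            show c0.1 - 1 < H from by omega, show (0:Int) ≤ c0.2 - 1 from by omega,
            show c0.2 - 1 < W from by omega⟩
        have hshiftc : shiftC (c0.1 - 1, c0.2 - 1) = c0 := by
          refine Prod.ext ?_ ?_ <;> simp [shiftC]
        have hfi : fI ((srcCells H W A).map shiftC) c0 =
            fI (srcCells H W A) (c0.1 - 1, c0.2 - 1) :=
          calc fI ((srcCells H W A).map shiftC) c0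
              = fI ((srcCells H W A).map shiftC) (shiftC (c0.1 - 1, c0.2 - 1)) := by
                rw [hshiftc]
            _ = fI (srcCells H W A) (c0.1 - 1, c0.2 - 1) := fI_shift _ _
        rw [hfi]
        exact hfold.2 _ (List.mem_map_of_mem hc0')
      · exact hfold.1
    · rcases hmem with hmem | hmem
      · rw [hmem]
        have h11 : interC H W (1, 1) := ⟨by omega, by omega, by omega, by omega⟩
        have hx := hub (1, 1) (interC_inBox H W _ h11)
        rw [hvF2 (1, 1) (interC_inBox H W _ h11), if_pos h11] at hx
        have hf0 := fI_nonneg ((srcCells H W A).map shiftC) (1, 1)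
        have hwl : wallConst ≤ (0 : Int) := by decide
        omega
      · obtain ⟨c', hc', he'⟩ := List.mem_map.mp hmem
        rw [← he']
        obtain ⟨hb1, hb2, hb3, hb4⟩ := (mem_cellsHW H W c').mp hc'
        have hsc : interC H W (shiftC c') :=
          ⟨by simp [shiftC]; omega, by simp [shiftC]; omega,
           by simp [shiftC]; omega, by simp [shiftC]; omega⟩
        have hx := hub (shiftC c') (interC_inBox H W _ hsc)
        rw [hvF2 (shiftC c') (interC_inBox H W _ hsc), if_pos hsc, fI_shift] at hx
        exact hx


-- ---- degenerate grids ----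
theorem initState_deg (H W : Int) (A : List String) (hD : H ≤ 0 ∨ W ≤ 0) :
    initState H W A = (initGrid H W, []) := by
  unfold initState
  rcases hD with h | h
  · rw [show PySem.List.pyRange 0 H 1 = [] from PySem.List.pyRange_one_eq_nil (by omega)]
    rfl
  · rw [show PySem.List.pyRange 0 W 1 = [] from PySem.List.pyRange_one_eq_nil (by omega)]
    simp only [List.foldl_nil]
    exact foldl_id _ _

theorem initGrid_H0 (W : Int) (hW : -1 ≤ W) :
    initGrid 0 W = [List.replicate (W + 2).toNat wallConst,
      List.replicate (W + 2).toNat wallConst] := by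
  rw [initGrid_eq 0 W (by omega) hW]
  rw [show PySem.List.pyRange 0 (0 + 2) 1 = [0, 1] from by decide]
  rw [show ((0:Int) + 1).toNat = 1 from by decide]
  rfl

theorem initGrid_Hneg1 (W : Int) (hW : -1 ≤ W) :
    initGrid (-1) W = [List.replicate (W + 2).toNat wallConst] := by
  rw [initGrid_eq (-1) W (by omega) hW]
  rw [show PySem.List.pyRange 0 (-1 + 2) 1 = [0] from by decide]
  rw [show ((-1:Int) + 1).toNat = 0 from by decide]
  rfl

theorem initGrid_len (H W : Int) : (initGrid H W).length = (H + 2).toNat := by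
  unfold initGrid
  rw [PySem.List.length_pySetD, PySem.List.length_pySetD, List.length_map,
    PySem.List.length_pyRange_one]
  omega

theorem rows_deg (H W : Int) (hH : -1 ≤ H) (hW : -1 ≤ W) (hD : H ≤ 0 ∨ W ≤ 0)
    (r : List Int) (hr : r ∈ initGrid H W) : r ≠ [] ∧ ∀ v ∈ r, v = wallConst := by
  have hwrne : List.replicate (W + 2).toNat wallConst ≠ [] := by
    intro h
    have hl : (List.replicate (W + 2).toNat wallConst).length = 0 := by rw [h]; rfl
    rw [List.length_replicate] at hl
    omega
  have hwr : ∀ v ∈ List.replicate (W + 2).toNat wallConst, v = wallConst :=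
    fun v hv => List.eq_of_mem_replicate hv
  by_cases hWc : W ≤ 0
  · rw [initGrid_eq H W hH hW] at hr
    have hW0 : W.toNat = 0 := by omega
    rcases List.mem_or_eq_of_mem_set hr with hr | hr
    · rcases List.mem_or_eq_of_mem_set hr with hr | hr
      · obtain ⟨_, _, he⟩ := List.mem_map.mp hr
        rw [← he, hW0]
        refine ⟨by simp, ?_⟩
        intro v hv
        simp at hv
        simpa using hv
      · rw [hr]; exact ⟨hwrne, hwr⟩
    · rw [hr]; exact ⟨hwrne, hwr⟩
  · have hHc : H = 0 ∨ H = -1 := by omega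
    rcases hHc with h | h
    · subst h
      rw [initGrid_H0 W hW] at hr
      rcases List.mem_cons.mp hr with h | h
      · rw [h]; exact ⟨hwrne, hwr⟩
      · rw [List.mem_singleton.mp h]; exact ⟨hwrne, hwr⟩
    · subst h
      rw [initGrid_Hneg1 W hW] at hr
      rw [List.mem_singleton.mp hr]
      exact ⟨hwrne, hwr⟩

theorem initGrid_ne_nil (H W : Int) (hH : -1 ≤ H) : initGrid H W ≠ [] := by
  intro h
  have hl := initGrid_len H W
  rw [h] at hl
  simp at hl
  omega

theorem solve_deg (H W : Int) (A : List String) (hH : -1 ≤ H) (hW : -1 ≤ W)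
    (hD : H ≤ 0 ∨ W ≤ 0) : solve H W A = wallConst := by
  unfold solve
  rw [initState_deg H W A hD, bfsLoop_nil]
  apply rowMax_const
  · simpa using initGrid_ne_nil H W hH
  · intro v hv
    obtain ⟨r, hr, he⟩ := List.mem_map.mp hv
    obtain ⟨hrne, hrw⟩ := rows_deg H W hH hW hD r hr
    rw [← he]
    exact hrw _ (rowMax_mem r hrne)

theorem solve_alt_deg (H W : Int) (A : List String) (hD : H ≤ 0 ∨ W ≤ 0) :
    solve_alt H W A = wallConst := by
  unfold solve_alt
  rcases hD with h | h
  · rw [show PySem.List.pyRange 0 H 1 = [] from PySem.List.pyRange_one_eq_nil (by omega)]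
    rfl
  · rw [show PySem.List.pyRange 0 W 1 = [] from PySem.List.pyRange_one_eq_nil (by omega)]
    simp only [List.foldl_nil]
    exact foldl_id _ _

-- ===== VERDICT (by name: the statement is the Claim_ definition above) =====
theorem solve_spec : Claim_equal_solve := by
  intro H W A _ hPre
  obtain ⟨h0, h1, h2⟩ := hPre
  show solve H W A = solve_alt H W A
  by_cases hH : 1 ≤ H
  · by_cases hW : 1 ≤ W
    · exact main_eq H W A hH hW
    · rw [solve_deg H W A h0 h1 (Or.inr (by omega)), solve_alt_deg H W A (Or.inr (by omega))]
  · rw [solve_deg H W A h0 h1 (Or.inl (by omega)), solve_alt_deg H W A (Or.inl (by omega))]
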